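-- pv_equiv track=rewrite | github.com/ranwez/CDScompare | script/annot_CSC.py | get_reading_frame
-- ===== SOURCE A (Python) =====
-- def get_reading_frame(cds_bounds, area_bounds, debug=False, verbose=False):
--     nb_nt = 0;
--     nb_nt_in_cds=0;
--     cdsb=0; # cds bounds index
--     reading_frames = [];
--     for i in range(0, len(area_bounds)-1, 2):
--         # move to the CDS containing the current area
--         while area_bounds[i] > cds_bounds[cdsb+1]:
--             nb_nt += cds_bounds[cdsb+1] - cds_bounds[cdsb] +1;
--             cdsb+=2
--         # now set the reading frame of the current are
--         nb_nt_in_cds = area_bounds[i]-cds_bounds[cdsb]+1;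
--         reading_frames.append((nb_nt+nb_nt_in_cds-1) % 3 +1);
--     return reading_frames;
-- ===== SOURCE B (Python) =====
-- def get_reading_frame(cds_bounds, area_bounds, debug=False, verbose=False):
--     # Prefix-sum table of CDS segment lengths + per-query binary search over the
--     # (sorted) segment ends, instead of A's interleaved linear scan.
--     nseg = len(cds_bounds) // 2
--     pref = [0]
--     for k in range(nseg):
--         pref.append(pref[-1] + cds_bounds[2 * k + 1] - cds_bounds[2 * k] + 1)
--     frames = []
--     j = 0
--     for i in range(0, len(area_bounds) - 1, 2):
--         a = area_bounds[i]
--         lo, hi = j, nseg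
--         while lo < hi:
--             mid = (lo + hi) // 2
--             if cds_bounds[2 * mid + 1] < a:
--                 lo = mid + 1
--             else:
--                 hi = mid
--         j = lo
--         frames.append((pref[j] + a - cds_bounds[2 * j]) % 3 + 1)
--     return frames
-- ===== Notes on version B (the rewrite author's own statement) =====
-- stated objective: alternative
-- what changed: B precomputes a prefix-sum table of CDS segment lengths once and answers each area start with a binary search over the segment ends (valid because Pre_ restricts to the well-formed, nondecreasing CDS ends of the genomic format), replacing A's interleaved linear scan that re-derives a running nucleotide count inside the query loop.
-- outside the precondition, e.g. on get_reading_frame([0, 9, 0, 5], [7, 7], False, False): A returns [2], B raises IndexError; on get_reading_frame([5, 11, 1, 4, 11, 10], [5, 0, 5, 4], False, False): A returns [1, 1], B returns [3, 3]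
import Mathlib
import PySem

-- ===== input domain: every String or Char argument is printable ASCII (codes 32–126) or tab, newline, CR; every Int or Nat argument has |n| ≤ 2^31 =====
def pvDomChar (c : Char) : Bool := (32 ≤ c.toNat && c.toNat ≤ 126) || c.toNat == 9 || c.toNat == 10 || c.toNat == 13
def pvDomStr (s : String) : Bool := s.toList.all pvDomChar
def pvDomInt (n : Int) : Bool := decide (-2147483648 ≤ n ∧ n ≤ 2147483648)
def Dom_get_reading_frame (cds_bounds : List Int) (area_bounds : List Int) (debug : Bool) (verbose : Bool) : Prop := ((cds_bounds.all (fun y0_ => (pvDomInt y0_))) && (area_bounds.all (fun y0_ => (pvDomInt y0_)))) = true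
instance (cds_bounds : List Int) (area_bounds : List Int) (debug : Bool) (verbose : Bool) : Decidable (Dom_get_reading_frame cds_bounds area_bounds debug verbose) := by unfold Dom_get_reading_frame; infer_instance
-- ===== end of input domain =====

-- B replaces A's interleaved linear scan by a prefix-sum table of segment lengths plus a
-- per-query binary search over the (nondecreasing, per Pre_) CDS segment ends (objective: alternative).

-- ===== PORT A =====
-- the inner 'while area_bounds[i] > cds_bounds[cdsb+1]' loop; indices are nonnegative
-- counters, so xs[k] is xs[k]? (none = IndexError, propagated as the loop's failure)
def pvAWhile (cds : List Int) (a : Int) (nb : Int) (cdsb : Nat) : Option (Int × Nat) :=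
  match h : cds[cdsb + 1]? with
  | none => none
  | some e =>
    if a > e then
      match cds[cdsb]? with
      | none => none
      | some s => pvAWhile cds a (nb + (e - s + 1)) (cdsb + 2)
    else some (nb, cdsb)
termination_by cds.length - cdsb
decreasing_by
  have : cdsb + 1 < cds.length := (List.getElem?_eq_some_iff.mp h).1
  omega

-- one iteration of A's for loop; state (reading_frames, nb_nt, cdsb), none = IndexError
def pvAStep (cds area : List Int) (acc : Option (List Int × Int × Nat)) (i : Int) : Option (List Int × Int × Nat) :=
  match acc with
  | none => none
  | some (rfs, nb, cdsb) =>
    match PySem.List.pyGet? area i with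
    | none => none
    | some a =>
      match pvAWhile cds a nb cdsb with
      | none => none
      | some (nb', cdsb') =>
        match cds[cdsb']? with
        | none => none
        | some s =>
          some (rfs ++ [PySem.Int.mod (nb' + (a - s + 1) - 1) 3 + 1], nb', cdsb')

def get_reading_frame (cds_bounds : List Int) (area_bounds : List Int) (debug : Bool) (verbose : Bool) : List Int :=
  match (PySem.List.pyRange 0 ((area_bounds.length : Int) - 1) 2).foldl (pvAStep cds_bounds area_bounds) (some ([], 0, 0)) with
  | none => []            -- unreachable under Pre_
  | some (rfs, _, _) => rfs

-- ===== PORT B =====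
-- the 'while lo < hi' binary-search loop of Source B; lo, hi stay nonnegative, so they are Nat and
-- Python's (lo+hi)//2 is Nat division; 'mid' is inlined; cds[2*mid+1] is always in range here
-- (mid < hi ≤ len(cds)//2 at every call), so getD's default is never consulted
def pvBisect (cds : List Int) (a : Int) (lo hi : Nat) : Nat :=
  if lo < hi then
    if cds.getD (2 * ((lo + hi) / 2) + 1) 0 < a then pvBisect cds a ((lo + hi) / 2 + 1) hi
    else pvBisect cds a lo ((lo + hi) / 2)
  else lo
termination_by hi - lo
decreasing_by all_goals omega

-- the 'for k in range(nseg)' loop appending pref[-1] + cds[2k+1] - cds[2k] + 1;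
-- pref is nonempty throughout (it starts as [0]), so Python's pref[-1] is its last element
def pvPref (cds : List Int) (nseg : Nat) : List Int :=
  (PySem.List.pyRange 0 (nseg : Int) 1).foldl
    (fun pref k =>
      pref ++ [pref.getLastD 0 + PySem.List.pyGetD cds (2 * k + 1) 0 - PySem.List.pyGetD cds (2 * k) 0 + 1])
    [0]

-- one iteration of Source B's query loop; state (frames, j), none = IndexError
def pvBStep (cds pref : List Int) (nseg : Nat) (area : List Int)
    (acc : Option (List Int × Nat)) (i : Int) : Option (List Int × Nat) :=
  match acc with
  | none => none
  | some (frames, j) =>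
    match PySem.List.pyGet? area i with
    | none => none
    | some a =>
      match pref[pvBisect cds a j nseg]?, cds[2 * pvBisect cds a j nseg]? with
      | some p, some s => some (frames ++ [PySem.Int.mod (p + a - s) 3 + 1], pvBisect cds a j nseg)
      | _, _ => none

def get_reading_frame_alt (cds_bounds : List Int) (area_bounds : List Int) (debug : Bool) (verbose : Bool) : List Int :=
  match (PySem.List.pyRange 0 ((area_bounds.length : Int) - 1) 2).foldl
      (pvBStep cds_bounds (pvPref cds_bounds (cds_bounds.length / 2)) (cds_bounds.length / 2) area_bounds)
      (some ([], 0)) with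
  | none => []            -- unreachable under Pre_
  | some (frames, _) => frames

-- ===== PRECONDITION & SPEC =====
-- the area starts: area_bounds[i] for i in range(0, len(area_bounds)-1, 2)
def pvEvens (xs : List Int) : List Int :=
  match xs with
  | x :: _ :: rest => x :: pvEvens rest
  | _ => []

-- the CDS segment ends: cds_bounds[1::2] (each paired with a preceding start)
def pvOdds (xs : List Int) : List Int :=
  match xs with
  | _ :: e :: rest => e :: pvOdds rest
  | _ => []

-- Pre_ excludes (a) the inputs on which A raises IndexError (an area start larger than every CDS
-- segment end), and (b) inputs whose CDS segment ends cds_bounds[1::2] are not nondecreasing: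
-- there A still returns, but such input is a malformed annotation (segments out of order) and
-- A's forward linear scan picks segments B's binary search cannot reproduce.
def Pre_get_reading_frame (cds_bounds : List Int) (area_bounds : List Int) (debug : Bool) (verbose : Bool) : Prop :=
  List.Pairwise (· ≤ ·) (pvOdds cds_bounds) ∧
  ∀ a ∈ pvEvens area_bounds, ∃ e ∈ pvOdds cds_bounds, a ≤ e

instance (cds_bounds : List Int) (area_bounds : List Int) (debug : Bool) (verbose : Bool) : Decidable (Pre_get_reading_frame cds_bounds area_bounds debug verbose) := by unfold Pre_get_reading_frame; infer_instance

def pvWitness_get_reading_frame : List Int × List Int × Bool × Bool := ([1, 9], [2, 5], false, false)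

def Spec_get_reading_frame (cds_bounds : List Int) (area_bounds : List Int) (debug : Bool) (verbose : Bool) (out : List Int) : Prop := out = get_reading_frame_alt cds_bounds area_bounds debug verbose
instance (cds_bounds : List Int) (area_bounds : List Int) (debug : Bool) (verbose : Bool) (out : List Int) : Decidable (Spec_get_reading_frame cds_bounds area_bounds debug verbose out) := by unfold Spec_get_reading_frame; infer_instance

-- ===== CLAIM (what is proved, stated in full; the proofs are below) =====
def Claim_equal_get_reading_frame : Prop := ∀ (cds_bounds : List Int) (area_bounds : List Int) (debug : Bool) (verbose : Bool), Dom_get_reading_frame cds_bounds area_bounds debug verbose → Pre_get_reading_frame cds_bounds area_bounds debug verbose → Spec_get_reading_frame cds_bounds area_bounds debug verbose (get_reading_frame cds_bounds area_bounds debug verbose)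

-- ===== LEMMAS AND PROOFS =====

-- cumulative nucleotide count before segment j
def pvOff (cds : List Int) (j : Nat) : Int :=
  match cds, j with
  | s :: e :: rest, j + 1 => (e - s + 1) + pvOff rest j
  | _, _ => 0

-- B's state viewed as A's state
def pvConv (cds : List Int) (o : Option (List Int × Nat)) : Option (List Int × Int × Nat) :=
  o.map (fun p => (p.1, pvOff cds p.2, 2 * p.2))

theorem pvOff_zero (cds : List Int) : pvOff cds 0 = 0 := by
  cases cds with
  | nil => rfl
  | cons x xs => cases xs <;> rfl

theorem pvOff_succ (cds : List Int) (j : Nat) (s e : Int)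
    (hs : cds[2 * j]? = some s) (he : cds[2 * j + 1]? = some e) :
    pvOff cds (j + 1) = pvOff cds j + (e - s + 1) := by
  induction j generalizing cds with
  | zero =>
    match cds with
    | [] => simp at hs
    | [x] => simp at he
    | a :: b :: rest =>
      simp at hs he
      simp only [pvOff, pvOff_zero]
      omega
  | succ j ih =>
    match cds with
    | [] => simp at hs
    | [x] =>
      rw [show 2 * (j + 1) + 1 = 2 * j + 3 by ring] at he
      simp at he
    | a :: b :: rest =>
      rw [show 2 * (j + 1) = 2 * j + 1 + 1 by ring] at hs
      rw [show 2 * (j + 1) + 1 = 2 * j + 1 + 1 + 1 by ring] at he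
      simp only [List.getElem?_cons_succ] at hs he
      have := ih rest hs he
      simp only [pvOff]
      omega

theorem pvOdds_getElem? (xs : List Int) : ∀ k : Nat, (pvOdds xs)[k]? = xs[2 * k + 1]? := by
  induction xs using pvOdds.induct with
  | case1 x y rest ih =>
    intro k
    cases k with
    | zero => simp [pvOdds]
    | succ k =>
      rw [show 2 * (k + 1) + 1 = 2 * k + 1 + 1 + 1 by ring]
      simp only [pvOdds, List.getElem?_cons_succ]
      exact ih k
  | case2 xs h =>
    intro k
    match xs, h with
    | [], _ => simp [pvOdds]
    | [x], _ => simp [pvOdds]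
    | x :: y :: rest, h => exact absurd rfl (h x y rest)

theorem pvOdds_length (xs : List Int) : (pvOdds xs).length = xs.length / 2 := by
  induction xs using pvOdds.induct with
  | case1 x y rest ih => simp only [pvOdds, List.length_cons]; omega
  | case2 xs h =>
    match xs, h with
    | [], _ => simp [pvOdds]
    | [x], _ => simp [pvOdds]
    | x :: y :: rest, h => exact absurd rfl (h x y rest)

theorem pvEvens_getElem? (xs : List Int) : ∀ k : Nat, 2 * k + 1 < xs.length → (pvEvens xs)[k]? = xs[2 * k]? := by
  induction xs using pvEvens.induct with
  | case1 x y rest ih =>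
    intro k hk
    cases k with
    | zero => simp [pvEvens]
    | succ k =>
      rw [show 2 * (k + 1) = 2 * k + 1 + 1 by ring]
      simp only [pvEvens, List.getElem?_cons_succ]
      apply ih
      simp at hk
      omega
  | case2 xs h =>
    intro k hk
    match xs, h with
    | [], _ => simp at hk
    | [x], _ => simp at hk
    | x :: y :: rest, h => exact absurd rfl (h x y rest)

-- sortedness of the Pairwise form, in index form on the raw list
theorem pvEndsMono (cds : List Int) (h : List.Pairwise (· ≤ ·) (pvOdds cds)) :
    ∀ k1 k2 : Nat, k1 ≤ k2 → 2 * k2 + 1 < cds.length →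
      cds.getD (2 * k1 + 1) 0 ≤ cds.getD (2 * k2 + 1) 0 := by
  intro k1 k2 hle hlen
  have hl := pvOdds_length cds
  have h1len : 2 * k1 + 1 < cds.length := by omega
  have g1 : (pvOdds cds)[k1]? = cds[2 * k1 + 1]? := pvOdds_getElem? cds k1
  have g2 : (pvOdds cds)[k2]? = cds[2 * k2 + 1]? := pvOdds_getElem? cds k2
  have hk2 : k2 < (pvOdds cds).length := by omega
  have hk1 : k1 < (pvOdds cds).length := by omega
  rw [List.getElem?_eq_getElem hk1, List.getElem?_eq_getElem h1len] at g1
  rw [List.getElem?_eq_getElem hk2, List.getElem?_eq_getElem hlen] at g2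
  simp only [Option.some_inj] at g1 g2
  rw [List.getD_eq_getElem cds 0 h1len, List.getD_eq_getElem cds 0 hlen, ← g1, ← g2]
  rcases Nat.eq_or_lt_of_le hle with heq | hlt
  · subst heq; exact le_refl _
  · exact List.pairwise_iff_getElem.mp h k1 k2 hk1 hk2 hlt

-- binary-search invariant: pvBisect returns the first index in [lo, hi) whose segment end is ≥ a
theorem pvBisect_spec (cds : List Int) (a : Int)
    (HS : ∀ k1 k2 : Nat, k1 ≤ k2 → 2 * k2 + 1 < cds.length →
      cds.getD (2 * k1 + 1) 0 ≤ cds.getD (2 * k2 + 1) 0) :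
    ∀ (n lo hi : Nat), hi - lo ≤ n → lo ≤ hi → 2 * hi ≤ cds.length →
      lo ≤ pvBisect cds a lo hi ∧ pvBisect cds a lo hi ≤ hi ∧
      (∀ k, lo ≤ k → k < pvBisect cds a lo hi → cds.getD (2 * k + 1) 0 < a) ∧
      (pvBisect cds a lo hi < hi → a ≤ cds.getD (2 * pvBisect cds a lo hi + 1) 0) := by
  intro n
  induction n with
  | zero =>
    intro lo hi h1 h2 h3
    have hlohi : lo = hi := by omega
    subst hlohi
    rw [pvBisect, if_neg (lt_irrefl lo)]
    exact ⟨le_refl _, le_refl _, fun k hk1 hk2 => absurd (Nat.lt_of_le_of_lt hk1 hk2) (Nat.lt_irrefl _),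
      fun h => absurd h (Nat.lt_irrefl _)⟩
  | succ n ih =>
    intro lo hi h1 h2 h3
    rw [pvBisect]
    by_cases hlt : lo < hi
    · simp only [if_pos hlt]
      by_cases hc : cds.getD (2 * ((lo + hi) / 2) + 1) 0 < a
      · simp only [if_pos hc]
        obtain ⟨ha1, ha2, ha3, ha4⟩ := ih ((lo + hi) / 2 + 1) hi (by omega) (by omega) h3
        refine ⟨by omega, ha2, ?_, ha4⟩
        intro k hk1 hk2
        by_cases hkm : k ≤ (lo + hi) / 2
        · exact lt_of_le_of_lt (HS k ((lo + hi) / 2) hkm (by omega)) hc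
        · exact ha3 k (by omega) hk2
      · simp only [if_neg hc]
        obtain ⟨ha1, ha2, ha3, ha4⟩ := ih lo ((lo + hi) / 2) (by omega) (by omega) (by omega)
        refine ⟨ha1, by omega, ha3, ?_⟩
        intro _
        rcases Nat.lt_or_ge (pvBisect cds a lo ((lo + hi) / 2)) ((lo + hi) / 2) with h | h
        · exact ha4 h
        · have heq : pvBisect cds a lo ((lo + hi) / 2) = (lo + hi) / 2 := by omega
          rw [heq]
          exact not_lt.mp hc
    · simp only [if_neg hlt]
      exact ⟨le_refl _, by omega, by intro k hk1 hk2; omega, by omega⟩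

-- A's while loop reaches exactly the first admissible segment index
theorem pvAWhile_reaches (cds : List Int) (a : Int) :
    ∀ (n j r : Nat), r - j ≤ n → j ≤ r → 2 * r + 1 < cds.length →
      a ≤ cds.getD (2 * r + 1) 0 →
      (∀ k, j ≤ k → k < r → cds.getD (2 * k + 1) 0 < a) →
      pvAWhile cds a (pvOff cds j) (2 * j) = some (pvOff cds r, 2 * r) := by
  intro n
  induction n with
  | zero =>
    intro j r h1 h2 hr ha hk
    have hjr : j = r := by omega
    subst hjr
    have hlen : 2 * j + 1 < cds.length := hr
    have hsome : cds[2 * j + 1]? = some (cds.getD (2 * j + 1) 0) := by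
      rw [List.getElem?_eq_getElem hlen, List.getD_eq_getElem cds 0 hlen]
    rw [pvAWhile]
    split
    next heq => rw [hsome] at heq; cases heq
    next e heq =>
      rw [hsome] at heq
      injection heq with heq'
      subst heq'
      rw [if_neg (by omega)]
  | succ n ih =>
    intro j r h1 h2 hr ha hk
    have hlen : 2 * j + 1 < cds.length := by omega
    have hsome : cds[2 * j + 1]? = some (cds.getD (2 * j + 1) 0) := by
      rw [List.getElem?_eq_getElem hlen, List.getD_eq_getElem cds 0 hlen]
    rw [pvAWhile]
    split
    next heq => rw [hsome] at heq; cases heq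
    next e heq =>
      rw [hsome] at heq
      injection heq with heq'
      subst heq'
      by_cases hjr : j = r
      · subst hjr
        rw [if_neg (by omega)]
      · have hjr' : j < r := by omega
        have hje : cds.getD (2 * j + 1) 0 < a := hk j (le_refl _) hjr'
        rw [if_pos (by omega)]
        have hslen : 2 * j < cds.length := by omega
        have hssome : cds[2 * j]? = some (cds.getD (2 * j) 0) := by
          rw [List.getElem?_eq_getElem hslen, List.getD_eq_getElem cds 0 hslen]
        split
        next heq2 => rw [hssome] at heq2; cases heq2
        next s heq2 =>
          rw [hssome] at heq2
          injection heq2 with heq2'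
          subst heq2'
          have hoff : pvOff cds j + (cds.getD (2 * j + 1) 0 - cds.getD (2 * j) 0 + 1) = pvOff cds (j + 1) :=
            (pvOff_succ cds j (cds.getD (2 * j) 0) (cds.getD (2 * j + 1) 0) hssome hsome).symm
          rw [show 2 * j + 2 = 2 * (j + 1) by ring, hoff]
          exact ih (j + 1) r (by omega) (by omega) hr ha (by intro k hk1 hk2; exact hk k (by omega) hk2)

-- the prefix table is the table of pvOff values
theorem pvPref_eq (cds : List Int) :
    ∀ n : Nat, 2 * n ≤ cds.length →
      pvPref cds n = (List.range (n + 1)).map (fun k => pvOff cds k) := by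
  intro n
  induction n with
  | zero =>
    intro _
    rw [show (List.range (0 + 1)).map (fun k => pvOff cds k) = [pvOff cds 0] from rfl, pvOff_zero]
    rfl
  | succ n ih =>
    intro hn
    have hrange : PySem.List.pyRange 0 ((n + 1 : Nat) : Int) 1
        = PySem.List.pyRange 0 ((n : Nat) : Int) 1 ++ [(n : Int)] := by
      push_cast
      exact PySem.List.pyRange_one_succ_right (by exact_mod_cast Nat.zero_le n)
    unfold pvPref
    rw [hrange, List.foldl_append]
    have hprev : (PySem.List.pyRange 0 ((n : Nat) : Int) 1).foldl
        (fun pref k => pref ++ [pref.getLastD 0 + PySem.List.pyGetD cds (2 * k + 1) 0 - PySem.List.pyGetD cds (2 * k) 0 + 1]) [0]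
        = (List.range (n + 1)).map (fun k => pvOff cds k) := by
      have := ih (by omega)
      unfold pvPref at this
      exact this
    rw [hprev]
    simp only [List.foldl_cons, List.foldl_nil]
    have hlen1 : 2 * n + 1 < cds.length := by omega
    have hlen0 : 2 * n < cds.length := by omega
    have hgl : ((List.range (n + 1)).map (fun k => pvOff cds k)).getLastD 0 = pvOff cds n := by
      rw [List.range_succ, List.map_append]
      simp
    have hget1 : PySem.List.pyGetD cds (2 * (n : Int) + 1) 0 = cds.getD (2 * n + 1) 0 := by
      rw [show (2 * (n : Int) + 1) = ((2 * n + 1 : Nat) : Int) by push_cast; ring]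
      rw [PySem.List.pyGetD_natCast]
    have hget0 : PySem.List.pyGetD cds (2 * (n : Int)) 0 = cds.getD (2 * n) 0 := by
      rw [show (2 * (n : Int)) = ((2 * n : Nat) : Int) by push_cast; ring]
      rw [PySem.List.pyGetD_natCast]
    rw [hgl, hget1, hget0]
    rw [show List.range (n + 1 + 1) = List.range (n + 1) ++ [n + 1] from List.range_succ]
    rw [List.map_append]
    congr 1
    simp only [List.map_cons, List.map_nil]
    congr 1
    have hs : cds[2 * n]? = some (cds.getD (2 * n) 0) := by
      rw [List.getElem?_eq_getElem hlen0, List.getD_eq_getElem cds 0 hlen0]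
    have he : cds[2 * n + 1]? = some (cds.getD (2 * n + 1) 0) := by
      rw [List.getElem?_eq_getElem hlen1, List.getD_eq_getElem cds 0 hlen1]
    rw [pvOff_succ cds n _ _ hs he]
    ring

theorem pvPref_getElem? (cds : List Int) (n k : Nat) (h2n : 2 * n ≤ cds.length) (hk : k ≤ n) :
    (pvPref cds n)[k]? = some (pvOff cds k) := by
  rw [pvPref_eq cds n h2n]
  rw [List.getElem?_map]
  rw [List.getElem?_range (by omega)]
  rfl

-- folding either step function from a failed state stays failed
theorem pvAStep_foldl_none (cds area : List Int) (idxs : List Int) :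
    idxs.foldl (pvAStep cds area) none = none := by
  induction idxs with
  | nil => rfl
  | cons i rest ih => rw [List.foldl_cons]; exact ih

theorem pvBStep_foldl_none (cds pref : List Int) (nseg : Nat) (area : List Int) (idxs : List Int) :
    idxs.foldl (pvBStep cds pref nseg area) none = none := by
  induction idxs with
  | nil => rfl
  | cons i rest ih => rw [List.foldl_cons]; exact ih

-- the two query loops walk in lockstep
theorem pvFold_eq (cds area : List Int)
    (HS : ∀ k1 k2 : Nat, k1 ≤ k2 → 2 * k2 + 1 < cds.length →
      cds.getD (2 * k1 + 1) 0 ≤ cds.getD (2 * k2 + 1) 0) :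
    ∀ (idxs : List Int) (frames : List Int) (j : Nat),
      (∀ i ∈ idxs, ∀ aval, PySem.List.pyGet? area i = some aval →
        ∃ k, 2 * k + 1 < cds.length ∧ aval ≤ cds.getD (2 * k + 1) 0) →
      (j < cds.length / 2 ∨ j = 0) →
      idxs.foldl (pvAStep cds area) (some (frames, pvOff cds j, 2 * j)) =
        pvConv cds (idxs.foldl (pvBStep cds (pvPref cds (cds.length / 2)) (cds.length / 2) area) (some (frames, j))) := by
  intro idxs
  induction idxs with
  | nil => intro frames j _ _; rfl
  | cons i rest ih =>
    intro frames j hex hj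
    simp only [List.foldl_cons]
    cases ha : PySem.List.pyGet? area i with
    | none =>
      have hA : pvAStep cds area (some (frames, pvOff cds j, 2 * j)) i = none := by
        simp [pvAStep, ha]
      have hB : pvBStep cds (pvPref cds (cds.length / 2)) (cds.length / 2) area (some (frames, j)) i = none := by
        simp [pvBStep, ha]
      rw [hA, hB, pvAStep_foldl_none, pvBStep_foldl_none]
      rfl
    | some a =>
      -- there is an admissible segment at or after j
      obtain ⟨k0, hk0len, hk0le⟩ := hex i (by simp) a ha
      have hk0seg : k0 < cds.length / 2 := by omega
      have hexj : ∃ k, j ≤ k ∧ 2 * k + 1 < cds.length ∧ a ≤ cds.getD (2 * k + 1) 0 := by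
        rcases hj with hj | hj
        · by_cases hkj : j ≤ k0
          · exact ⟨k0, hkj, hk0len, hk0le⟩
          · exact ⟨j, le_refl _, by omega, le_trans hk0le (HS k0 j (by omega) (by omega))⟩
        · subst hj; exact ⟨k0, Nat.zero_le _, hk0len, hk0le⟩
      obtain ⟨k1, hk1j, hk1len, hk1le⟩ := hexj
      have hjle : j ≤ cds.length / 2 := by omega
      obtain ⟨hb1, hb2, hb3, hb4⟩ :=
        pvBisect_spec cds a HS (cds.length / 2 - j) j (cds.length / 2) (by omega) hjle (by omega)
      -- the found index is strictly inside the segment table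
      have hrlt : pvBisect cds a j (cds.length / 2) < cds.length / 2 := by
        rcases Nat.lt_or_ge (pvBisect cds a j (cds.length / 2)) (cds.length / 2) with h | h
        · exact h
        · exfalso
          have : k1 < pvBisect cds a j (cds.length / 2) := by omega
          exact absurd hk1le (not_le.mpr (hb3 k1 hk1j this))
      have hrlen : 2 * pvBisect cds a j (cds.length / 2) + 1 < cds.length := by omega
      have hra := hb4 hrlt
      -- A's while loop lands on the same index
      have hwhile := pvAWhile_reaches cds a (pvBisect cds a j (cds.length / 2)) j
        (pvBisect cds a j (cds.length / 2)) (by omega) hb1 hrlen hra hb3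
      have hslen : 2 * pvBisect cds a j (cds.length / 2) < cds.length := by omega
      have hssome : cds[2 * pvBisect cds a j (cds.length / 2)]? = some (cds.getD (2 * pvBisect cds a j (cds.length / 2)) 0) := by
        rw [List.getElem?_eq_getElem hslen, List.getD_eq_getElem cds 0 hslen]
      have hpref : (pvPref cds (cds.length / 2))[pvBisect cds a j (cds.length / 2)]?
          = some (pvOff cds (pvBisect cds a j (cds.length / 2))) :=
        pvPref_getElem? cds (cds.length / 2) _ (by omega) (by omega)
      have hA : pvAStep cds area (some (frames, pvOff cds j, 2 * j)) i =
          some (frames ++ [PySem.Int.mod (pvOff cds (pvBisect cds a j (cds.length / 2)) + (a - cds.getD (2 * pvBisect cds a j (cds.length / 2)) 0 + 1) - 1) 3 + 1],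
            pvOff cds (pvBisect cds a j (cds.length / 2)), 2 * pvBisect cds a j (cds.length / 2)) := by
        simp only [pvAStep, ha, hwhile, hssome]
      have hB : pvBStep cds (pvPref cds (cds.length / 2)) (cds.length / 2) area (some (frames, j)) i =
          some (frames ++ [PySem.Int.mod (pvOff cds (pvBisect cds a j (cds.length / 2)) + a - cds.getD (2 * pvBisect cds a j (cds.length / 2)) 0) 3 + 1],
            pvBisect cds a j (cds.length / 2)) := by
        simp only [pvBStep, ha, hpref, hssome]
      rw [hA, hB]
      have harith : pvOff cds (pvBisect cds a j (cds.length / 2)) + (a - cds.getD (2 * pvBisect cds a j (cds.length / 2)) 0 + 1) - 1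
          = pvOff cds (pvBisect cds a j (cds.length / 2)) + a - cds.getD (2 * pvBisect cds a j (cds.length / 2)) 0 := by ring
      rw [harith]
      exact ih _ (pvBisect cds a j (cds.length / 2))
        (by intro i' hi' aval hav; exact hex i' (by simp [hi']) aval hav)
        (Or.inl hrlt)

-- the admissibility hypothesis, derived from Pre_ for the generated index list
theorem pvIdx_admissible (cds area : List Int)
    (hpre : ∀ a ∈ pvEvens area, ∃ e ∈ pvOdds cds, a ≤ e) :
    ∀ i ∈ PySem.List.pyRange 0 ((area.length : Int) - 1) 2, ∀ aval,
      PySem.List.pyGet? area i = some aval →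
      ∃ k, 2 * k + 1 < cds.length ∧ aval ≤ cds.getD (2 * k + 1) 0 := by
  intro i hi aval hget
  obtain ⟨hi0, hi1, hi2⟩ := (PySem.List.mem_pyRange_iff_of_pos (by norm_num) i).mp hi
  obtain ⟨t, ht⟩ := hi2
  have ht0 : 0 ≤ t := by omega
  obtain ⟨k, hk⟩ : ∃ k : Nat, i = 2 * (k : Int) := ⟨t.toNat, by omega⟩
  subst hk
  have hklen : 2 * k + 1 < area.length := by
    have : 2 * (k : Int) < (area.length : Int) - 1 := hi1
    omega
  have hget' : area[2 * k]? = some aval := by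
    rw [show (2 * (k : Int)) = ((2 * k : Nat) : Int) by push_cast; ring] at hget
    rwa [PySem.List.pyGet?_natCast] at hget
  have hmem : aval ∈ pvEvens area := by
    have := pvEvens_getElem? area k hklen
    rw [hget'] at this
    exact List.mem_of_getElem? this
  obtain ⟨e, hemem, hele⟩ := hpre aval hmem
  obtain ⟨m, hm, hme⟩ := List.getElem_of_mem hemem
  have hodds : (pvOdds cds)[m]? = cds[2 * m + 1]? := pvOdds_getElem? cds m
  rw [List.getElem?_eq_getElem hm] at hodds
  have hmlen : 2 * m + 1 < cds.length := by
    rcases List.getElem?_eq_some_iff.mp hodds.symm with ⟨h, _⟩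
    exact h
  refine ⟨m, hmlen, ?_⟩
  rw [List.getD_eq_getElem cds 0 hmlen]
  have : cds[2 * m + 1] = e := by
    rw [List.getElem?_eq_getElem hmlen] at hodds
    simp only [Option.some_inj] at hodds
    rw [← hodds, hme]
  rw [this]
  exact hele

theorem pvMain_eq (cds area : List Int) (d v : Bool)
    (hpre : Pre_get_reading_frame cds area d v) :
    get_reading_frame cds area d v = get_reading_frame_alt cds area d v := by
  obtain ⟨hsorted, hbound⟩ := hpre
  have HS := pvEndsMono cds hsorted
  have h := pvFold_eq cds area HS (PySem.List.pyRange 0 ((area.length : Int) - 1) 2) [] 0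
    (pvIdx_admissible cds area hbound) (Or.inr rfl)
  rw [pvOff_zero] at h
  unfold get_reading_frame get_reading_frame_alt
  rw [show (2 * 0 : Nat) = 0 by rfl] at h
  rw [h]
  cases (PySem.List.pyRange 0 ((area.length : Int) - 1) 2).foldl
      (pvBStep cds (pvPref cds (cds.length / 2)) (cds.length / 2) area) (some ([], 0)) with
  | none => rfl
  | some p => rfl

-- ===== VERDICT (by name: the statement is the Claim_ definition above) =====
theorem get_reading_frame_spec : Claim_equal_get_reading_frame := by
  intro cds area d v _ hpre
  unfold Spec_get_reading_frame
  exact pvMain_eq cds area d v hpre
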